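-- pv_equiv track=rewrite | github.com/cosmorockz/Relative-entanglement-spectrum | Interacting Codes/RelativeESspaceEfficientInteracting.py | OperatorDecomposition
-- ===== SOURCE A (Python) =====
-- def OperatorDecomposition(state):
--     # Decomposes an array into two arrays in all possible ways
--     # Given a wavefunction in the operator basis, it decomposes the wavefunction in A and B parts in all the possible ways
--     flags = [False]*len(state)
--     D = []
--     while True:
--         a = [state[i] for i,flag in enumerate(flags) if flag]
--         b = [state[i] for i,flag in enumerate(flags) if not flag]
--         D.append([a,b])
--         for i in range(len(state)):
--             flags[i] = not flags[i]
--             if flags[i]: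
--                 break
--         else:
--             break
--     return D
-- ===== SOURCE B (Python) =====
-- def OperatorDecomposition(state):
--     # Structural recursion on the state: the decompositions of x::rest are
--     # obtained by doubling the decompositions of rest, placing x in the
--     # B part first and then in the A part (matching the counting order).
--     if not state:
--         return [[[], []]]
--     x = state[0]
--     out = []
--     for a, b in OperatorDecomposition(state[1:]):
--         out.append([a, [x] + b])
--         out.append([[x] + a, b])
--     return out
-- ===== Notes on version B (the rewrite author's own statement) =====
-- stated objective: alternative
-- what changed: Replaced A's while-True loop over an in-place boolean flag array with carry increment by a structural recursion on the list: the decompositions of x::rest are obtained by doubling the decompositions of rest, emitting x in the B part then in the A part, with no flags, masks or counters.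
import Mathlib
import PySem

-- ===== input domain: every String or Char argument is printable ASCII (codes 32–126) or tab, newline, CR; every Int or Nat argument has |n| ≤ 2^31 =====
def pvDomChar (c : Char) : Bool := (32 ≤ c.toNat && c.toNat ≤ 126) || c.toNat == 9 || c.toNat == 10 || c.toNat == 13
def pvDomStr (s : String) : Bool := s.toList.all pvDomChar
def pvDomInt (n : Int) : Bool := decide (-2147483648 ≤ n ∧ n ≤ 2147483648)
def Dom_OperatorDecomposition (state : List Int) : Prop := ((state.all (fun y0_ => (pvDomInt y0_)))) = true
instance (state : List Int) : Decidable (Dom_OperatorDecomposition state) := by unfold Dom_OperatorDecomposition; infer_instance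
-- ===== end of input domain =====

-- B replaces A's in-place flag-array with carry-propagating increment by a structural
-- recursion on the list that doubles the tail's decompositions (alternative decomposition, same cost).

-- ===== PORT A =====
-- [state[i] for i,flag in enumerate(flags) if flag == want]; pyGetD is exact here: every
-- enumerate index i satisfies 0 ≤ i < len(flags) = len(state).
def pvPickA (state : List Int) (flags : List Bool) (want : Bool) : List Int :=
  (PySem.List.enumerate flags).filterMap
    (fun p => if p.2 == want then some (PySem.List.pyGetD state p.1 0) else none)

-- inner 'for i in range(len(state)): flags[i] = not flags[i]; if flags[i]: break'
-- returns (new flags, whether 'break' happened); no break = for-else → outer loop ends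
def pvIncA : List Bool → List Bool × Bool
  | [] => ([], false)
  | f :: rest =>
    if !f then (true :: rest, true)
    else
      let r := pvIncA rest
      (false :: r.1, r.2)

-- the 'while True' loop; fuel = 2^len(state) only makes it total, it is never exhausted
def pvLoopA (state : List Int) : List Bool → List (List (List Int)) → Nat → List (List (List Int))
  | _, D, 0 => D
  | flags, D, fuel + 1 =>
    let D' := D ++ [[pvPickA state flags true, pvPickA state flags false]]
    let r := pvIncA flags
    if r.2 then pvLoopA state r.1 D' fuel else D'

def OperatorDecomposition (state : List Int) : List (List (List Int)) :=
  pvLoopA state (List.replicate state.length false) [] (2 ^ state.length)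

-- ===== PORT B =====
-- structural recursion: Python's 'for a, b in OperatorDecomposition(state[1:])' unpacks the
-- 2-element entries; the match mirrors that unpacking (other shapes never occur)
def OperatorDecomposition_alt : List Int → List (List (List Int))
  | [] => [[[], []]]
  | x :: rest =>
    (OperatorDecomposition_alt rest).flatMap (fun e =>
      match e with
      | [a, b] => [[a, x :: b], [x :: a, b]]
      | _ => [])

-- ===== PRECONDITION & SPEC =====
def Spec_OperatorDecomposition (state : List Int) (out : List (List (List Int))) : Prop := out = OperatorDecomposition_alt state
instance (state : List Int) (out : List (List (List Int))) : Decidable (Spec_OperatorDecomposition state out) := by unfold Spec_OperatorDecomposition; infer_instance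

-- ===== CLAIM (what is proved, stated in full; the proofs are below) =====
def Claim_equal_OperatorDecomposition : Prop := ∀ (state : List Int), Dom_OperatorDecomposition state → Spec_OperatorDecomposition state (OperatorDecomposition state)

-- ===== LEMMAS AND PROOFS =====

-- the flag list A holds when the abstract counter is m (little-endian bits of m)
def pvFlagsOf (n m : Nat) : List Bool := (List.range n).map (fun i => (m >>> i) &&& 1 == 1)

-- A's entry for counter value m, described by bit extraction
def pvBody (state : List Int) (mask : Nat) : List (List Int) :=
  [((List.range state.length).filter (fun i => (mask >>> i) &&& 1 == 1)).map (fun i => state.getD i 0),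
   ((List.range state.length).filter (fun i => !((mask >>> i) &&& 1 == 1))).map (fun i => state.getD i 0)]

lemma pvFlagsOf_succ (n m : Nat) :
    pvFlagsOf (n + 1) m = (m &&& 1 == 1) :: pvFlagsOf n (m >>> 1) := by
  simp [pvFlagsOf, List.range_succ_eq_map, Function.comp, Nat.shiftRight_add]
  intro a _
  rw [← Nat.shiftRight_add, ← Nat.shiftRight_add, Nat.add_comm]

lemma pvPick_spec (state : List Int) (f : Nat → Bool) (n : Nat) (w : Bool) :
    pvPickA state ((List.range n).map f) w
      = ((List.range n).filter (fun i => f i == w)).map (fun i => state.getD i 0) := by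
  induction n with
  | zero => simp [pvPickA]
  | succ n ih =>
    rw [List.range_succ, List.map_append, List.filter_append, List.map_append, ← ih]
    simp only [pvPickA, PySem.List.enumerate_append, List.filterMap_append]
    congr 1
    simp only [PySem.List.enumerate, List.filterMap, List.filter, List.map, List.length_map,
      List.length_range]
    cases hb : (f n == w) <;>
      simp [PySem.List.pyGetD_natCast, List.getD]

-- one pass of A's increment = +1 on the counter; the break flag is 'not yet wrapped'
lemma pvInc_spec (n : Nat) : ∀ m : Nat, m < 2 ^ n →
    pvIncA (pvFlagsOf n m) = (pvFlagsOf n (m + 1), decide (m + 1 < 2 ^ n)) := by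
  induction n with
  | zero =>
    intro m h
    interval_cases m
    simp [pvFlagsOf, pvIncA]
  | succ n ih =>
    intro m h
    rw [pvFlagsOf_succ, pvFlagsOf_succ]
    rcases Nat.even_or_odd m with he | ho
    · -- m even: bit 0 is false, flips to true, break at once
      have h1 : m &&& 1 = 0 := by
        simpa [Nat.and_one_is_mod] using Nat.even_iff.mp he
      have h2 : (m + 1) &&& 1 = 1 := by
        have := Nat.even_iff.mp he
        simp [Nat.and_one_is_mod]; omega
      have h3 : (m + 1) >>> 1 = m >>> 1 := by
        have := Nat.even_iff.mp he
        simp [Nat.shiftRight_one]; omega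
      have h4 : m + 1 < 2 ^ (n + 1) := by
        have := Nat.even_iff.mp he
        have h2n : 2 ^ (n + 1) % 2 = 0 := by simp [Nat.pow_succ]
        omega
      simp [pvIncA, h1, h2, h3, h4]
    · -- m odd: bit 0 is true, flips to false, carry continues in the tail
      have h1 : m &&& 1 = 1 := by
        simpa [Nat.and_one_is_mod] using Nat.odd_iff.mp ho
      have h2 : (m + 1) &&& 1 = 0 := by
        have := Nat.odd_iff.mp ho
        simp [Nat.and_one_is_mod]; omega
      have h3 : (m + 1) >>> 1 = m >>> 1 + 1 := by
        have := Nat.odd_iff.mp ho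
        simp [Nat.shiftRight_one]; omega
      have h5 : m >>> 1 < 2 ^ n := by
        simp [Nat.shiftRight_one, Nat.pow_succ] at h ⊢; omega
      have h6 : (m >>> 1 + 1 < 2 ^ n) = (m + 1 < 2 ^ (n + 1)) := by
        have := Nat.odd_iff.mp ho
        simp only [Nat.shiftRight_one, Nat.pow_succ, eq_iff_iff]
        omega
      simp [pvIncA, h1, h2, h3, ih _ h5, h6]

lemma pvEmit_eq_body (state : List Int) (m : Nat) :
    [pvPickA state (pvFlagsOf state.length m) true, pvPickA state (pvFlagsOf state.length m) false]
      = pvBody state m := by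
  simp [pvFlagsOf, pvBody, pvPick_spec]

lemma pvLoop_spec (state : List Int) :
    ∀ (fuel m : Nat) (D : List (List (List Int))), m < 2 ^ state.length →
      m + fuel = 2 ^ state.length →
      pvLoopA state (pvFlagsOf state.length m) D fuel
        = D ++ (List.range' m fuel).map (pvBody state) := by
  intro fuel
  induction fuel with
  | zero => intro m D h1 h2; omega
  | succ fuel ih =>
    intro m D h1 h2
    rw [pvLoopA, pvEmit_eq_body, pvInc_spec _ _ h1]
    by_cases hlt : m + 1 < 2 ^ state.length
    · simp only [hlt, decide_true, if_true]
      rw [ih (m + 1) _ hlt (by omega), List.range'_succ, List.map_cons]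
      simp
    · have hf : fuel = 0 := by omega
      simp [hlt, hf, List.range'_succ]

lemma pvFlagsOf_zero (n : Nat) : List.replicate n false = pvFlagsOf n 0 := by
  simp [pvFlagsOf]

-- the two components of pvBody for x :: s, split off the head index
lemma pvBody_key1 (x : Int) (s : List Int) (m : Nat) :
    ((List.range (s.length + 1)).filter (fun i => (m >>> i) &&& 1 == 1)).map
        (fun i => (x :: s).getD i 0)
      = (if m &&& 1 == 1 then [x] else []) ++
        ((List.range s.length).filter (fun i => ((m >>> 1) >>> i) &&& 1 == 1)).map
          (fun i => s.getD i 0) := by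
  have hsr : ∀ i : Nat, m >>> (i + 1) = (m >>> 1) >>> i := by
    intro i; rw [← Nat.shiftRight_add, Nat.add_comm]
  have hp : ((fun i => (m >>> i) &&& 1 == 1) ∘ Nat.succ)
      = (fun i => ((m >>> 1) >>> i) &&& 1 == 1) := by
    funext i
    simp only [Function.comp_apply, Nat.succ_eq_add_one]
    rw [hsr]
  have hg : ((fun i => (x :: s).getD i 0) ∘ Nat.succ) = (fun i => s.getD i 0) := by
    funext i; rfl
  rw [List.range_succ_eq_map, List.filter_cons, List.filter_map, hp]
  by_cases hb : (m &&& 1 == 1) = true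
  · rw [Nat.shiftRight_zero, if_pos hb, if_pos hb, List.map_cons, List.map_map, hg]
    rfl
  · rw [Nat.shiftRight_zero, if_neg hb, if_neg hb, List.map_map, hg]
    rfl

lemma pvBody_key0 (x : Int) (s : List Int) (m : Nat) :
    ((List.range (s.length + 1)).filter (fun i => !((m >>> i) &&& 1 == 1))).map
        (fun i => (x :: s).getD i 0)
      = (if !(m &&& 1 == 1) then [x] else []) ++
        ((List.range s.length).filter (fun i => !(((m >>> 1) >>> i) &&& 1 == 1))).map
          (fun i => s.getD i 0) := by
  have hsr : ∀ i : Nat, m >>> (i + 1) = (m >>> 1) >>> i := by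
    intro i; rw [← Nat.shiftRight_add, Nat.add_comm]
  have hp : ((fun i => !((m >>> i) &&& 1 == 1)) ∘ Nat.succ)
      = (fun i => !(((m >>> 1) >>> i) &&& 1 == 1)) := by
    funext i
    simp only [Function.comp_apply, Nat.succ_eq_add_one]
    rw [hsr]
  have hg : ((fun i => (x :: s).getD i 0) ∘ Nat.succ) = (fun i => s.getD i 0) := by
    funext i; rfl
  rw [List.range_succ_eq_map, List.filter_cons, List.filter_map, hp]
  by_cases hb : (!(m &&& 1 == 1)) = true
  · rw [Nat.shiftRight_zero, if_pos hb, if_pos hb, List.map_cons, List.map_map, hg]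
    rfl
  · rw [Nat.shiftRight_zero, if_neg hb, if_neg hb, List.map_map, hg]
    rfl

lemma pvBody_cons (x : Int) (s : List Int) (m : Nat) :
    pvBody (x :: s) m =
      if m &&& 1 == 1 then
        [x :: (pvBody s (m >>> 1)).getD 0 [], (pvBody s (m >>> 1)).getD 1 []]
      else
        [(pvBody s (m >>> 1)).getD 0 [], x :: (pvBody s (m >>> 1)).getD 1 []] := by
  unfold pvBody
  rw [List.length_cons, pvBody_key1, pvBody_key0]
  by_cases hb : (m &&& 1 == 1) = true
  · rw [if_pos hb, if_pos hb, if_neg (by revert hb; cases (m &&& 1 == 1) <;> simp)]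
    rfl
  · have hb' : (!(m &&& 1 == 1)) = true := by
      revert hb; cases (m &&& 1 == 1) <;> simp
    rw [if_neg hb, if_neg hb, if_pos hb']
    rfl

-- B equals A's bit-extraction description, by structural induction on state
lemma pvAlt_eq (state : List Int) :
    OperatorDecomposition_alt state = (List.range (2 ^ state.length)).map (pvBody state) := by
  induction state with
  | nil => simp [OperatorDecomposition_alt, pvBody]
  | cons x s ih =>
    have hdouble : List.range (2 ^ (s.length + 1))
        = (List.range (2 ^ s.length)).flatMap (fun h => [2 * h, 2 * h + 1]) := by
      have : ∀ k : Nat, List.range (2 * k) = (List.range k).flatMap (fun h => [2 * h, 2 * h + 1]) := by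
        intro k
        induction k with
        | zero => simp
        | succ k ihk =>
          rw [List.range_succ, List.flatMap_append, ← ihk]
          have h2 : 2 * (k + 1) = (2 * k + 1) + 1 := by ring
          rw [h2, List.range_succ, List.range_succ]
          simp
      rw [Nat.pow_succ, Nat.mul_comm, this]
    rw [List.length_cons, hdouble, List.map_flatMap]
    rw [OperatorDecomposition_alt, ih, List.flatMap_map]
    apply List.flatMap_congr
    intro h _
    have e0 : (2 * h) &&& 1 = 0 := by simp [Nat.and_one_is_mod, Nat.mul_mod_right]
    have e1 : (2 * h + 1) &&& 1 = 1 := by simp [Nat.and_one_is_mod]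
    have s0 : (2 * h) >>> 1 = h := by simp [Nat.shiftRight_one]
    have s1 : (2 * h + 1) >>> 1 = h := by simp [Nat.shiftRight_one]; omega
    rw [List.map_cons, List.map_cons, List.map_nil,
      pvBody_cons, pvBody_cons, e0, e1, s0, s1]
    simp [pvBody]

-- ===== VERDICT (by name: the statement is the Claim_ definition above) =====
theorem OperatorDecomposition_spec : Claim_equal_OperatorDecomposition := by
  intro state _
  unfold Spec_OperatorDecomposition
  rw [OperatorDecomposition, pvFlagsOf_zero,
    pvLoop_spec state _ 0 [] (Nat.two_pow_pos _) (by omega), pvAlt_eq]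
  simp [List.range_eq_range']
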